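-- pv_equiv track=rewrite | github.com/ragat69/loi-jeanbrun-gouv | generation-pages-villes/fetch_city_data.py | get_main_postal_code
-- ===== SOURCE A (Python) =====
-- def get_main_postal_code(codes_postaux: list, code_insee: str) -> str:
--     """Retourne le code postal principal."""
--     if not codes_postaux:
--         # Déduire du code INSEE (approximatif)
--         return code_insee[:2] + "000"
--
--     # Pour les grandes villes avec plusieurs codes postaux, prendre le "principal"
--     # Généralement c'est le premier avec 000 ou 001
--     sorted_codes = sorted(codes_postaux)
--
--     # Chercher un code en xxx000
--     for code in sorted_codes:
--         if code.endswith('000'):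
--             return code
--
--     # Sinon prendre le premier et normaliser
--     first = sorted_codes[0]
--     # Remplacer les derniers chiffres par 000
--     return first[:2] + "000"
-- ===== SOURCE B (Python) =====
-- def get_main_postal_code(codes_postaux: list, code_insee: str) -> str:
--     """Retourne le code postal principal."""
--     if not codes_postaux:
--         return code_insee[:2] + "000"
--     # One pass: smallest code overall, and smallest code ending in '000'.
--     best_overall = None
--     best_triple = None
--     for code in codes_postaux:
--         if best_overall is None or code < best_overall:
--             best_overall = code
--         if code.endswith('000'):
--             if best_triple is None or code < best_triple:
--                 best_triple = code
--     if best_triple is not None: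
--         return best_triple
--     return best_overall[:2] + "000"
-- ===== Notes on version B (the rewrite author's own statement) =====
-- stated objective: faster
-- what changed: Replaces sort-then-scan (sorted list, first code ending in '000', else sorted[0][:2]+'000') with a single pass that maintains the lexicographically smallest code overall and the smallest code ending in '000'.
import Mathlib
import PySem

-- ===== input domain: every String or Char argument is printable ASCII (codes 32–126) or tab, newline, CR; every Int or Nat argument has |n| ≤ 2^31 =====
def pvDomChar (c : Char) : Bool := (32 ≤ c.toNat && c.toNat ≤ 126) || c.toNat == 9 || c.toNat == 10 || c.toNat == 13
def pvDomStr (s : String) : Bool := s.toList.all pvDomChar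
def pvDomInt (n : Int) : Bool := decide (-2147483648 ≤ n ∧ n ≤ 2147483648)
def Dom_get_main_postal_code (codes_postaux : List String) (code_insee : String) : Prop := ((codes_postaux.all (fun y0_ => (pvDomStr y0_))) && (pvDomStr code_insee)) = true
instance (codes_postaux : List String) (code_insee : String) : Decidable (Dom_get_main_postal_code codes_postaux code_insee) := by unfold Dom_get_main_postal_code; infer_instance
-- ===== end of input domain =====

-- B replaces A's sort-then-scan with a single pass keeping the smallest code overall
-- and the smallest code ending in '000' (objective: faster, O(n) vs O(n log n)).

-- ===== PORT A =====
def get_main_postal_code (codes_postaux : List String) (code_insee : String) : String :=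
  if codes_postaux.isEmpty then
    -- code_insee[:2] + "000"
    String.ofList (PySem.List.slice code_insee.toList none (some 2) ++ "000".toList)
  else
    let sorted_codes := PySem.List.sorted codes_postaux (fun x => x) false
    match sorted_codes.find? (fun code => PySem.Str.endswith code "000") with
    | some code => code
    | none =>
      -- sorted_codes[0]: the list is nonempty here, so headD's default is never used
      let first := sorted_codes.headD ""
      String.ofList (PySem.List.slice first.toList none (some 2) ++ "000".toList)

-- ===== PORT B =====
def get_main_postal_code_alt (codes_postaux : List String) (code_insee : String) : String :=
  if codes_postaux.isEmpty then
    String.ofList (PySem.List.slice code_insee.toList none (some 2) ++ "000".toList)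
  else
    let st := codes_postaux.foldl
      (fun (acc : Option String × Option String) code =>
        (match acc.1 with
         | none => some code
         | some b => if code < b then some code else some b,
         if PySem.Str.endswith code "000" then
           match acc.2 with
           | none => some code
           | some b => if code < b then some code else some b
         else acc.2))
      (none, none)
    match st.2 with
    | some t => t
    | none =>
      match st.1 with
      | some b => String.ofList (PySem.List.slice b.toList none (some 2) ++ "000".toList)
      | none => ""  -- unreachable: codes_postaux is nonempty

-- ===== PRECONDITION & SPEC =====
def Spec_get_main_postal_code (codes_postaux : List String) (code_insee : String) (out : String) : Prop := out = get_main_postal_code_alt codes_postaux code_insee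
instance (codes_postaux : List String) (code_insee : String) (out : String) : Decidable (Spec_get_main_postal_code codes_postaux code_insee out) := by unfold Spec_get_main_postal_code; infer_instance

-- ===== CLAIM (what is proved, stated in full; the proofs are below) =====
def Claim_equal_get_main_postal_code : Prop := ∀ (codes_postaux : List String) (code_insee : String), Dom_get_main_postal_code codes_postaux code_insee → Spec_get_main_postal_code codes_postaux code_insee (get_main_postal_code codes_postaux code_insee)

-- ===== LEMMAS AND PROOFS =====

-- the running-minimum step of B
def pvStep (acc : Option String) (code : String) : Option String :=
  match acc with
  | none => some code
  | some b => if code < b then some code else some b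

theorem pvStep_some (b code : String) : pvStep (some b) code = some (min b code) := by
  by_cases h : code < b
  · simp [pvStep, h, min_def, not_le.mpr h]
  · simp [pvStep, h, not_lt.mp h]

theorem pvStep_none (code : String) : pvStep none code = some code := rfl

theorem foldl_pvStep_some (t : List String) (a : String) :
    t.foldl pvStep (some a) = some (t.foldl min a) := by
  induction t generalizing a with
  | nil => rfl
  | cons x xs ih => simp [List.foldl, pvStep_some, ih]

-- find? on a ≤-sorted list returns a least element among those satisfying p
theorem find?_sorted_min {p : String → Bool} (l : List String)
    (hp : l.Pairwise (· ≤ ·)) (c : String) (hf : l.find? p = some c) :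
    c ∈ l ∧ p c = true ∧ ∀ y ∈ l, p y = true → c ≤ y := by
  induction l with
  | nil => simp at hf
  | cons h t ih =>
    rcases List.pairwise_cons.mp hp with ⟨hle, hpt⟩
    by_cases hph : p h = true
    · rw [List.find?_cons_of_pos hph] at hf
      injection hf with hf
      subst hf
      refine ⟨List.mem_cons_self, hph, ?_⟩
      intro y hy _
      rcases List.mem_cons.mp hy with rfl | hy'
      · exact le_rfl
      · exact hle y hy'
    · rw [List.find?_cons_of_neg hph] at hf
      obtain ⟨hc, hpc, hmin⟩ := ih hpt hf
      refine ⟨List.mem_cons_of_mem _ hc, hpc, ?_⟩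
      intro y hy hpy
      rcases List.mem_cons.mp hy with rfl | hy'
      · exact absurd hpy (by simpa using hph)
      · exact hmin y hy' hpy

-- B's paired fold is the pair of the two independent folds
theorem fold_pair (l : List String) (init : Option String × Option String) :
    l.foldl
      (fun (acc : Option String × Option String) code =>
        (match acc.1 with
         | none => some code
         | some b => if code < b then some code else some b,
         if PySem.Str.endswith code "000" then
           match acc.2 with
           | none => some code
           | some b => if code < b then some code else some b
         else acc.2)) init
    = (l.foldl pvStep init.1,
       l.foldl (fun a c => if PySem.Str.endswith c "000" then pvStep a c else a) init.2) := by
  induction l generalizing init with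
  | nil => rfl
  | cons x xs ih =>
    rw [List.foldl_cons, List.foldl_cons, List.foldl_cons, ih]
    rfl

theorem get_main_postal_code_spec : Claim_equal_get_main_postal_code := by
  intro cps ci _
  unfold Spec_get_main_postal_code get_main_postal_code get_main_postal_code_alt
  cases cps with
  | nil => rfl
  | cons x t =>
    simp only [List.isEmpty_cons, if_neg (by simp : ¬ (false = true))]
    rw [fold_pair, PySem.List.foldl_if_eq_foldl_filter]
    set P : String → Bool := fun code => PySem.Str.endswith code "000" with hP
    clear hP
    have hpair : (PySem.List.sorted (x :: t) (fun x => x) false).Pairwise (· ≤ ·) :=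
      PySem.List.sorted_pairwise (x :: t) (fun x => x)
    cases hF : (PySem.List.sorted (x :: t) (fun x => x) false).find? P with
    | some c =>
      obtain ⟨hcS, hpc, hmin⟩ := find?_sorted_min _ hpair c hF
      have hcmem : c ∈ x :: t := (PySem.List.mem_sorted _ _ _ _).mp hcS
      have hcfil : c ∈ (x :: t).filter P := List.mem_filter.mpr ⟨hcmem, hpc⟩
      cases hfil : (x :: t).filter P with
      | nil => rw [hfil] at hcfil; simp at hcfil
      | cons y r =>
        rw [hfil] at hcfil
        have hm_mem : r.foldl min y ∈ y :: r := by
          rcases PySem.List.foldl_min_mem r y with h' | h'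
          · rw [h']; exact List.mem_cons_self
          · exact List.mem_cons_of_mem _ h'
        have hm_fil : r.foldl min y ∈ (x :: t).filter P := by rw [hfil]; exact hm_mem
        have hm_le : ∀ z ∈ y :: r, r.foldl min y ≤ z := by
          intro z hz
          rcases List.mem_cons.mp hz with rfl | hz'
          · exact (PySem.List.foldl_min_le r z).1
          · exact (PySem.List.foldl_min_le r y).2 z hz'
        have h1 : c ≤ r.foldl min y := by
          rcases List.mem_filter.mp hm_fil with ⟨hmm, hpm⟩
          exact hmin _ ((PySem.List.mem_sorted _ _ _ _).mpr hmm) hpm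
        have hcm : c = r.foldl min y := le_antisymm h1 (hm_le c hcfil)
        simp [pvStep_none, foldl_pvStep_some, hcm]
    | none =>
      have hfil : (x :: t).filter P = [] := by
        rw [List.filter_eq_nil_iff]
        intro y hy
        exact List.find?_eq_none.mp hF y ((PySem.List.mem_sorted _ _ _ _).mpr hy)
      have hSne : PySem.List.sorted (x :: t) (fun x => x) false ≠ [] := by
        simp [PySem.List.sorted_eq_nil_iff]
      cases hhd : PySem.List.sorted (x :: t) (fun x => x) false with
      | nil => exact absurd hhd hSne
      | cons h tl =>
        have hhle : ∀ y ∈ x :: t, h ≤ y := fun y hy =>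
          PySem.List.key_head_sorted_le _ _ hhd y hy
        have hhmem : h ∈ x :: t := (PySem.List.mem_sorted _ _ _ _).mp (hhd ▸ List.mem_cons_self)
        have hm_mem : t.foldl min x ∈ x :: t := by
          rcases PySem.List.foldl_min_mem t x with h' | h'
          · rw [h']; exact List.mem_cons_self
          · exact List.mem_cons_of_mem _ h'
        have hm_le : ∀ z ∈ x :: t, t.foldl min x ≤ z := by
          intro z hz
          rcases List.mem_cons.mp hz with rfl | hz'
          · exact (PySem.List.foldl_min_le t z).1
          · exact (PySem.List.foldl_min_le t x).2 z hz'
        have hhm : h = t.foldl min x := le_antisymm (hhle _ hm_mem) (hm_le _ hhmem)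
        simp [hfil, pvStep_none, foldl_pvStep_some, hhm]
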